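-- pv_equiv track=rewrite | github.com/fqueyroi/tulip_plugins | papers/NetFromSequentialData/TVGLlyodsImport.py | spaceANoRepIndexes
-- ===== SOURCE A (Python) =====
-- def spaceANoRepIndexes(ports,deps,arrs):
--   res = []
--   for i in range(len(ports) - 1) :
--     visited = set()
--     for j in range(i + 1,len(ports)) :
--       if ports[i] == ports[j] :
--         break;
--       if ports[j] not in visited :
--         visited.add(ports[j])
--         res.append((i,j))
--   return res
-- ===== SOURCE B (Python) =====
-- def spaceANoRepIndexes(ports, deps, arrs):
--     n = len(ports)
--     # prev[j] = index of the previous occurrence of ports[j], or -1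
--     prev = []
--     last = {}
--     for j, p in enumerate(ports):
--         prev.append(last.get(p, -1))
--         last[p] = j
--     # nxt[i] = index of the next occurrence of ports[i], or n
--     nxt_rev = []
--     first = {}
--     for k, p in enumerate(reversed(ports)):
--         nxt_rev.append(first.get(p, n))
--         first[p] = n - 1 - k
--     nxt = nxt_rev[::-1]
--     # (i, j) is emitted iff ports[i] does not recur in (i, j] and
--     # ports[j] first occurs at j within (i, j)
--     return [(i, j) for i in range(n) for j in range(i + 1, nxt[i]) if prev[j] <= i]
-- ===== Notes on version B (the rewrite author's own statement) =====
-- stated objective: alternative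
-- what changed: B replaces A's per-i visited-set inner scan (set lookups/inserts with an early break) by two precomputed occurrence arrays - prev[j] (previous index with the same port, else -1) and nxt[i] (next index with the same port, else n) built in one left and one right pass with a dict - and then emits (i,j) for j in range(i+1, nxt[i]) with the pure arithmetic test prev[j] <= i.
import Mathlib
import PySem

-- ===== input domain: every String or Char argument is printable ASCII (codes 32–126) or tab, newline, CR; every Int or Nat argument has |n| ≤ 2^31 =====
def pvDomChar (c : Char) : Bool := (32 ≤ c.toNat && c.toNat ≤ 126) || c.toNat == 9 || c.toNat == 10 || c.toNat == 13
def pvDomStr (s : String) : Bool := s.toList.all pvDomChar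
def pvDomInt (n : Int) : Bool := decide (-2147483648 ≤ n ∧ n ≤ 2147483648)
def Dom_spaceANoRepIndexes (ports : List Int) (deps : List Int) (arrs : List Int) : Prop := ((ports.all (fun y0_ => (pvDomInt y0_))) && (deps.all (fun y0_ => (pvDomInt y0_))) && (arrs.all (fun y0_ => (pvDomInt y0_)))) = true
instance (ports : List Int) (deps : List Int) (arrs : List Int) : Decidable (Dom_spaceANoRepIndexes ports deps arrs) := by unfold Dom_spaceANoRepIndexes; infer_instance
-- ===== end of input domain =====

-- B replaces A's per-i visited-set scan by precomputed previous/next-occurrence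
-- arrays and emits pairs by a pure arithmetic condition (alternative algorithm).


-- ===== PORT A =====
-- ports[k] for an index the loops keep in range (the default never fires there)
def pvGetI (xs : List Int) (k : Int) : Int := (PySem.List.pyGet? xs k).getD 0

-- inner 'for j in …: if ports[i]==ports[j]: break; …' loop of A
def pvAInner (ports : List Int) (i : Int) :
    List Int → PySem.Set Int → List (Int × Int) → List (Int × Int)
  | [], _, res => res
  | j :: js, visited, res =>
    if pvGetI ports i = pvGetI ports j then res
    else if PySem.Set.contains visited (pvGetI ports j) then
      pvAInner ports i js visited res
    else
      pvAInner ports i js (PySem.Set.add visited (pvGetI ports j)) (res ++ [(i, j)])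

def spaceANoRepIndexes (ports : List Int) (deps : List Int) (arrs : List Int) : List (Int × Int) :=
  (PySem.List.pyRange 0 ((ports.length : Int) - 1) 1).foldl
    (fun res i =>
      pvAInner ports i (PySem.List.pyRange (i + 1) (ports.length : Int) 1) PySem.Set.empty res)
    []

-- ===== PORT B =====
-- prev[j] = index of the previous occurrence of ports[j], or -1
def pvBPrev (ports : List Int) : List Int :=
  ((PySem.List.enumerate ports 0).foldl
    (fun (st : List Int × PySem.Dict Int Int) jp =>
      (st.1 ++ [st.2.getD jp.2 (-1)], st.2.insert jp.2 jp.1))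
    ([], PySem.Dict.empty)).1

-- nxt[i] = index of the next occurrence of ports[i], or n (built right-to-left, then reversed)
def pvBNxt (ports : List Int) : List Int :=
  (((PySem.List.enumerate ports.reverse 0).foldl
    (fun (st : List Int × PySem.Dict Int Int) kp =>
      (st.1 ++ [st.2.getD kp.2 (ports.length : Int)],
       st.2.insert kp.2 ((ports.length : Int) - 1 - kp.1)))
    ([], PySem.Dict.empty)).1).reverse

def spaceANoRepIndexes_alt (ports : List Int) (deps : List Int) (arrs : List Int) : List (Int × Int) :=
  let prev := pvBPrev ports
  let nxt := pvBNxt ports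
  (PySem.List.pyRange 0 (ports.length : Int) 1).flatMap (fun i =>
    ((PySem.List.pyRange (i + 1) (pvGetI nxt i) 1).filter
      (fun j => pvGetI prev j ≤ i)).map (fun j => (i, j)))

-- ===== PRECONDITION & SPEC =====
def Spec_spaceANoRepIndexes (ports : List Int) (deps : List Int) (arrs : List Int) (out : List (Int × Int)) : Prop := out = spaceANoRepIndexes_alt ports deps arrs
instance (ports : List Int) (deps : List Int) (arrs : List Int) (out : List (Int × Int)) : Decidable (Spec_spaceANoRepIndexes ports deps arrs out) := by unfold Spec_spaceANoRepIndexes; infer_instance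

-- ===== CLAIM (what is proved, stated in full; the proofs are below) =====
def Claim_equal_spaceANoRepIndexes : Prop := ∀ (ports : List Int) (deps : List Int) (arrs : List Int), Dom_spaceANoRepIndexes ports deps arrs → Spec_spaceANoRepIndexes ports deps arrs (spaceANoRepIndexes ports deps arrs)

-- ===== LEMMAS AND PROOFS =====

-- `g`-abbreviation used only in proofs
def pvG (ports : List Int) (k : Int) : Int := pvGetI ports k

-- the common canonical value: pairs (i, j) with ports[i] not recurring in (i, j]
-- and ports[j] first occurring (within (i, j)) at j
def pvCanon (ports : List Int) : List (Int × Int) :=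
  (PySem.List.pyRange 0 (ports.length : Int) 1).flatMap (fun i =>
    ((PySem.List.pyRange (i + 1) (ports.length : Int) 1).filter (fun j =>
      ((PySem.List.pyRange (i + 1) (j + 1) 1).all fun k => pvG ports k != pvG ports i) &&
      ((PySem.List.pyRange (i + 1) j 1).all fun k => pvG ports k != pvG ports j))).map
      (fun j => (i, j)))

-- A-side inner loop: accumulator factors out
theorem pvAInner_append (ports : List Int) (i : Int) (js : List Int) :
    ∀ (v : PySem.Set Int) (res : List (Int × Int)),
      pvAInner ports i js v res = res ++ pvAInner ports i js v [] := by
  induction js with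
  | nil => intro v res; simp [pvAInner]
  | cons j js ih =>
    intro v res
    simp only [pvAInner]
    split_ifs with h1 h2
    · simp
    · exact ih v res
    · rw [ih _ (res ++ [(i, j)]), ih _ ([] ++ [(i, j)])]
      simp

-- Set.contains through Set.add, Bool form
theorem pvContains_add (v : PySem.Set Int) (x y : Int) :
    PySem.Set.contains (PySem.Set.add v x) y =
      (PySem.Set.contains v y || (y == x)) := by
  rw [Bool.eq_iff_iff]
  simp only [PySem.Set.contains_iff, PySem.Set.mem_add, Bool.or_eq_true, beq_iff_eq]

-- A-side inner loop computes a filter of the remaining range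
theorem pvAInner_spec (ports : List Int) (i b : Int) :
    ∀ (m : Nat) (j0 : Int) (v : PySem.Set Int), (b - j0).toNat = m →
      pvAInner ports i (PySem.List.pyRange j0 b 1) v [] =
        ((PySem.List.pyRange j0 b 1).filter (fun j =>
          ((PySem.List.pyRange j0 (j + 1) 1).all fun k => pvG ports k != pvG ports i) &&
          !(PySem.Set.contains v (pvG ports j)) &&
          ((PySem.List.pyRange j0 j 1).all fun k => pvG ports k != pvG ports j))).map
          (fun j => (i, j)) := by
  intro m
  induction m with
  | zero =>
    intro j0 v hm
    rw [PySem.List.pyRange_one_eq_nil (by omega)]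
    simp [pvAInner]
  | succ m ih =>
    intro j0 v hm
    have hlt : j0 < b := by omega
    rw [PySem.List.pyRange_one_cons hlt]
    simp only [pvAInner]
    by_cases h1 : pvGetI ports i = pvGetI ports j0
    · rw [if_pos h1]
      have hnil : ((j0 :: PySem.List.pyRange (j0 + 1) b 1).filter (fun j =>
          ((PySem.List.pyRange j0 (j + 1) 1).all fun k => pvG ports k != pvG ports i) &&
          !(PySem.Set.contains v (pvG ports j)) &&
          ((PySem.List.pyRange j0 j 1).all fun k => pvG ports k != pvG ports j))) = [] := by
        rw [List.filter_eq_nil_iff]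
        intro j hj
        have hj0le : j0 ≤ j := by
          rcases List.mem_cons.mp hj with h | h
          · omega
          · have := (PySem.List.mem_pyRange_one.mp h).1; omega
        have hmem : j0 ∈ PySem.List.pyRange j0 (j + 1) 1 :=
          PySem.List.mem_pyRange_one.mpr ⟨le_refl _, by omega⟩
        simp only [Bool.and_eq_true, List.all_eq_true, not_and]
        intro hall
        have := hall.1 j0 hmem
        simp [pvG, h1] at this
      rw [hnil]; simp
    · rw [if_neg h1]
      have hhead : (pvGetI ports j0 != pvGetI ports i) = true := by
        simp only [bne_iff_ne, ne_eq]
        exact fun h => h1 h.symm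
      by_cases h2 : PySem.Set.contains v (pvGetI ports j0) = true
      · rw [if_pos h2]
        rw [ih (j0 + 1) v (by omega)]
        have hfil : ((j0 :: PySem.List.pyRange (j0 + 1) b 1).filter (fun j =>
            ((PySem.List.pyRange j0 (j + 1) 1).all fun k => pvG ports k != pvG ports i) &&
            !(PySem.Set.contains v (pvG ports j)) &&
            ((PySem.List.pyRange j0 j 1).all fun k => pvG ports k != pvG ports j)))
            = ((PySem.List.pyRange (j0 + 1) b 1).filter (fun j =>
            ((PySem.List.pyRange (j0 + 1) (j + 1) 1).all fun k => pvG ports k != pvG ports i) &&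
            !(PySem.Set.contains v (pvG ports j)) &&
            ((PySem.List.pyRange (j0 + 1) j 1).all fun k => pvG ports k != pvG ports j))) := by
          rw [List.filter_cons_of_neg]
          · apply List.filter_congr
            intro j hj
            have hjb := PySem.List.mem_pyRange_one.mp hj
            rw [PySem.List.pyRange_one_cons (show j0 < j + 1 by omega),
                PySem.List.pyRange_one_cons (show j0 < j by omega)]
            simp only [List.all_cons, pvG, hhead, Bool.true_and]
            by_cases hy : pvGetI ports j0 = pvGetI ports j
            · have hm2 : pvGetI ports j ∈ v := by
                rw [← hy]; exact (PySem.Set.contains_iff _ _).mp h2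
              simp [hm2]
            · have hne : (pvGetI ports j0 != pvGetI ports j) = true := by
                simp only [bne_iff_ne, ne_eq]; exact hy
              simp [hne]
          · simp only [Bool.and_eq_true]
            rintro ⟨⟨-, hB⟩, -⟩
            simp only [pvG, h2, Bool.not_true] at hB
            exact absurd hB (by simp)
        rw [hfil]
      · rw [if_neg h2]
        rw [pvAInner_append, ih (j0 + 1) (PySem.Set.add v (pvGetI ports j0)) (by omega)]
        have hcond : (((PySem.List.pyRange j0 (j0 + 1) 1).all fun k => pvG ports k != pvG ports i) &&
            !(PySem.Set.contains v (pvG ports j0)) &&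
            ((PySem.List.pyRange j0 j0 1).all fun k => pvG ports k != pvG ports j0)) = true := by
          rw [PySem.List.pyRange_one_singleton, PySem.List.pyRange_one_eq_nil (le_refl _)]
          simp [pvG, hhead]
          exact fun hm => h2 ((PySem.Set.contains_iff _ _).mpr hm)
        simp only [List.filter_cons, hcond, if_true, List.map_cons, List.nil_append,
          List.singleton_append, List.cons.injEq, true_and]
        refine congrArg _ (List.filter_congr ?_)
        intro j hj
        have hjb := PySem.List.mem_pyRange_one.mp hj
        rw [PySem.List.pyRange_one_cons (show j0 < j + 1 by omega),
            PySem.List.pyRange_one_cons (show j0 < j by omega)]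
        simp only [List.all_cons, pvG, hhead, Bool.true_and]
        rw [pvContains_add]
        by_cases hy : pvGetI ports j0 = pvGetI ports j
        · have hbe : (pvGetI ports j == pvGetI ports j0) = true := by
            simp only [beq_iff_eq]; exact hy.symm
          have hne : (pvGetI ports j0 != pvGetI ports j) = false := by
            simp only [bne_eq_false_iff_eq]; exact hy
          simp only [hbe, hne, Bool.or_true, Bool.not_true, Bool.and_false, Bool.false_and]
        · have hbe : (pvGetI ports j == pvGetI ports j0) = false := by
            simp only [beq_eq_false_iff_ne, ne_eq]
            exact fun h => hy h.symm
          have hne : (pvGetI ports j0 != pvGetI ports j) = true := by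
            simp only [bne_iff_ne, ne_eq]; exact hy
          simp only [hbe, hne, Bool.or_false, Bool.true_and]

theorem pvA_eq_canon (ports : List Int) (deps arrs : List Int) :
    spaceANoRepIndexes ports deps arrs = pvCanon ports := by
  unfold spaceANoRepIndexes pvCanon
  have hfold : ∀ (l : List Int) (acc : List (Int × Int)),
      l.foldl (fun res i =>
        pvAInner ports i (PySem.List.pyRange (i + 1) (ports.length : Int) 1) PySem.Set.empty res) acc
        = acc ++ l.flatMap (fun i =>
            pvAInner ports i (PySem.List.pyRange (i + 1) (ports.length : Int) 1) PySem.Set.empty []) := by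
    intro l
    induction l with
    | nil => intro acc; simp
    | cons x xs ih =>
      intro acc
      simp only [List.foldl_cons, List.flatMap_cons]
      rw [pvAInner_append, ih]
      simp [List.append_assoc]
  rw [hfold]
  simp only [List.nil_append]
  have hinner : ∀ i : Int,
      pvAInner ports i (PySem.List.pyRange (i + 1) (ports.length : Int) 1) PySem.Set.empty []
        = ((PySem.List.pyRange (i + 1) (ports.length : Int) 1).filter (fun j =>
            ((PySem.List.pyRange (i + 1) (j + 1) 1).all fun k => pvG ports k != pvG ports i) &&
            ((PySem.List.pyRange (i + 1) j 1).all fun k => pvG ports k != pvG ports j))).map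
            (fun j => (i, j)) := by
    intro i
    rw [pvAInner_spec ports i (ports.length : Int) (((ports.length : Int) - (i + 1)).toNat)
      (i + 1) PySem.Set.empty rfl]
    refine congrArg _ (List.filter_congr ?_)
    intro j hj
    simp
  by_cases hz : (ports.length : Int) = 0
  · rw [hz]
    rw [PySem.List.pyRange_one_eq_nil (show (0:Int) ≤ 0 from le_refl _),
        PySem.List.pyRange_one_eq_nil (show (0:Int) - 1 ≤ 0 by omega)]
    simp
  · have h1 : (1:Int) ≤ (ports.length : Int) := by
      have : (0:Int) ≤ (ports.length : Int) := Int.natCast_nonneg _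
      omega
    have hsplit : PySem.List.pyRange 0 (ports.length : Int) 1
        = PySem.List.pyRange 0 ((ports.length : Int) - 1) 1 ++ [(ports.length : Int) - 1] := by
      rw [PySem.List.pyRange_one_append 0 ((ports.length : Int) - 1) (ports.length : Int)
        (by omega) (by omega)]
      congr 1
      have hs := PySem.List.pyRange_one_singleton ((ports.length : Int) - 1)
      rw [show ((ports.length : Int) - 1) + 1 = (ports.length : Int) by ring] at hs
      exact hs
    rw [hsplit, List.flatMap_append]
    simp only [List.flatMap_cons, List.flatMap_nil, List.append_nil]
    have hlast : PySem.List.pyRange (((ports.length : Int) - 1) + 1) (ports.length : Int) 1 = [] :=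
      PySem.List.pyRange_one_eq_nil (by omega)
    rw [hlast]
    simp only [List.filter_nil, List.map_nil, List.append_nil]
    simp only [hinner]


-- ---- B-side: characterisation of the prev/next-occurrence arrays ----

-- the step functions of B's two build loops (definitionally those of pvBPrev/pvBNxt)
def pvPrevStep (st : List Int × PySem.Dict Int Int) (jp : Int × Int) : List Int × PySem.Dict Int Int :=
  (st.1 ++ [st.2.getD jp.2 (-1)], st.2.insert jp.2 jp.1)

def pvNxtStep (n : Int) (st : List Int × PySem.Dict Int Int) (kp : Int × Int) : List Int × PySem.Dict Int Int :=
  (st.1 ++ [st.2.getD kp.2 n], st.2.insert kp.2 (n - 1 - kp.1))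

theorem pvBPrev_eq (ports : List Int) :
    pvBPrev ports = ((PySem.List.enumerate ports 0).foldl pvPrevStep ([], PySem.Dict.empty)).1 := rfl

theorem pvBNxt_eq (ports : List Int) :
    pvBNxt ports = (((PySem.List.enumerate ports.reverse 0).foldl
      (pvNxtStep (ports.length : Int)) ([], PySem.Dict.empty)).1).reverse := rfl

theorem pvG_natCast (xs : List Int) (t : Nat) : pvG xs (t : Int) = (xs[t]?).getD 0 := by
  simp [pvG, pvGetI, PySem.List.pyGet?_natCast]

-- specification of one prev entry
def pvPrevProp (ports : List Int) (j p : Int) : Prop :=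
  -1 ≤ p ∧ p < j ∧ (∀ t, p < t → t < j → pvG ports t ≠ pvG ports j) ∧
    (0 ≤ p → pvG ports p = pvG ports j)

-- specification of one nxt entry
def pvNxtProp (ports : List Int) (i q : Int) : Prop :=
  i < q ∧ q ≤ (ports.length : Int) ∧ (∀ t, i < t → t < q → pvG ports t ≠ pvG ports i) ∧
    (q < (ports.length : Int) → pvG ports q = pvG ports i)

-- dictionary invariant of the prev loop: `d` maps each value to its last occurrence before m
def pvDinvP (ports : List Int) (m : Int) (d : PySem.Dict Int Int) : Prop :=
  ∀ v : Int, (∀ k, d.get? v = some k →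
      0 ≤ k ∧ k < m ∧ pvG ports k = v ∧ ∀ t, k < t → t < m → pvG ports t ≠ v) ∧
    (d.get? v = none → ∀ t, 0 ≤ t → t < m → pvG ports t ≠ v)

theorem pvPrevFoldAux (ports : List Int) :
    ∀ (l : List Int) (m : Nat), m ≤ ports.length → ports.drop m = l →
    ∀ (acc : List Int) (d : PySem.Dict Int Int), acc.length = m → pvDinvP ports (m : Int) d →
    (((PySem.List.enumerate l (m : Int)).foldl pvPrevStep (acc, d)).1.length = ports.length) ∧
    (∀ t : Nat, t < m →
      (((PySem.List.enumerate l (m : Int)).foldl pvPrevStep (acc, d)).1)[t]? = acc[t]?) ∧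
    (∀ j : Nat, m ≤ j → j < ports.length →
      pvPrevProp ports (j : Int)
        (((((PySem.List.enumerate l (m : Int)).foldl pvPrevStep (acc, d)).1)[j]?).getD 0)) := by
  intro l
  induction l with
  | nil =>
    intro m hm hdrop acc d hacc hinv
    have hlen : ports.length ≤ m := by
      have := List.drop_eq_nil_iff.mp hdrop
      omega
    refine ⟨?_, ?_, ?_⟩
    · simp [PySem.List.enumerate_nil, hacc]; omega
    · intro t ht; simp [PySem.List.enumerate_nil]
    · intro j hj hj2; omega
  | cons x l' ih =>
    intro m hm hdrop acc d hacc hinv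
    have hmlt : m < ports.length := by
      by_contra hc
      have : ports.drop m = [] := List.drop_eq_nil_iff.mpr (by omega)
      rw [this] at hdrop; exact (List.cons_ne_nil x l') hdrop.symm
    have hdrop' : ports.drop (m + 1) = l' := by
      have h1 : ports.drop (m + 1) = (ports.drop m).drop 1 := by
        rw [List.drop_drop]
      rw [h1, hdrop]; rfl
    have hget : ports[m]? = some x := by
      have h0 : (ports.drop m)[0]? = some x := by rw [hdrop]; rfl
      rwa [List.getElem?_drop, Nat.add_zero] at h0
    have hgm : pvG ports (m : Int) = x := by
      rw [pvG_natCast, hget]; rfl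
    rw [PySem.List.enumerate_cons]
    simp only [List.foldl_cons]
    have hstep : pvPrevStep (acc, d) ((m : Int), x)
        = (acc ++ [d.getD x (-1)], d.insert x (m : Int)) := rfl
    rw [hstep]
    have hinv' : pvDinvP ports ((m : Int) + 1) (d.insert x (m : Int)) := by
      intro v
      constructor
      · intro k hk
        rw [PySem.Dict.get?_insert] at hk
        split_ifs at hk with hv
        · cases hk
          subst hv
          refine ⟨Int.natCast_nonneg _, by omega, hgm, ?_⟩
          intro t ht1 ht2; omega
        · have := (hinv v).1 k hk
          refine ⟨this.1, by omega, this.2.2.1, ?_⟩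
          intro t ht1 ht2
          by_cases htm : t = (m : Int)
          · rw [htm, hgm]; exact fun h => hv h.symm
          · exact this.2.2.2 t ht1 (by omega)
      · intro hk
        rw [PySem.Dict.get?_insert] at hk
        split_ifs at hk with hv
        intro t ht1 ht2
        by_cases htm : t = (m : Int)
        · rw [htm, hgm]; exact fun h => hv h.symm
        · exact (hinv v).2 hk t ht1 (by omega)
    have hih := ih (m + 1) (by omega) hdrop' (acc ++ [d.getD x (-1)]) (d.insert x (m : Int))
      (by simp [hacc]) (by exact_mod_cast hinv')
    have hcast : ((m : Int) + 1) = ((m + 1 : Nat) : Int) := by push_cast; ring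
    rw [hcast]
    refine ⟨hih.1, ?_, ?_⟩
    · intro t ht
      rw [hih.2.1 t (by omega)]
      rw [List.getElem?_append_left (by omega)]
    · intro j hj hj2
      by_cases hjm : j = m
      · subst hjm
        have hres : ((((PySem.List.enumerate l' ((j + 1 : Nat) : Int)).foldl pvPrevStep
            (acc ++ [d.getD x (-1)], d.insert x (j : Int))).1)[j]?) = some (d.getD x (-1)) := by
          rw [hih.2.1 j (by omega)]
          rw [List.getElem?_append_right (by omega), hacc]
          simp
        rw [hres]
        simp only [Option.getD_some]
        rw [PySem.Dict.getD_eq_get?_getD]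
        cases hdx : d.get? x with
        | none =>
          simp only [Option.getD_none]
          have hn := (hinv x).2 hdx
          refine ⟨le_refl _, by omega, ?_, by omega⟩
          intro t ht1 ht2
          rw [hgm]
          exact hn t (by omega) ht2
        | some k =>
          simp only [Option.getD_some]
          have hs := (hinv x).1 k hdx
          refine ⟨by omega, by omega, ?_, ?_⟩
          · intro t ht1 ht2
            rw [hgm]
            exact hs.2.2.2 t ht1 ht2
          · intro _
            rw [hgm]
            exact hs.2.2.1
      · exact hih.2.2 j (by omega) hj2

-- dictionary invariant of the nxt loop: `d` maps each value to its first occurrence in the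
-- already-processed suffix (the last c positions)
def pvDinvN (ports : List Int) (c : Int) (d : PySem.Dict Int Int) : Prop :=
  ∀ v : Int, (∀ k, d.get? v = some k →
      (ports.length : Int) - c ≤ k ∧ k < (ports.length : Int) ∧ pvG ports k = v ∧
        ∀ t, (ports.length : Int) - c ≤ t → t < k → pvG ports t ≠ v) ∧
    (d.get? v = none → ∀ t, (ports.length : Int) - c ≤ t → t < (ports.length : Int) →
      pvG ports t ≠ v)

theorem pvNxtFoldAux (ports : List Int) :
    ∀ (l : List Int) (c : Nat), c ≤ ports.length → ports.reverse.drop c = l →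
    ∀ (acc : List Int) (d : PySem.Dict Int Int), acc.length = c → pvDinvN ports (c : Int) d →
    (((PySem.List.enumerate l (c : Int)).foldl (pvNxtStep (ports.length : Int)) (acc, d)).1.length
        = ports.length) ∧
    (∀ t : Nat, t < c →
      (((PySem.List.enumerate l (c : Int)).foldl (pvNxtStep (ports.length : Int)) (acc, d)).1)[t]?
        = acc[t]?) ∧
    (∀ t : Nat, c ≤ t → t < ports.length →
      pvNxtProp ports ((ports.length : Int) - 1 - (t : Int))
        (((((PySem.List.enumerate l (c : Int)).foldl (pvNxtStep (ports.length : Int))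
          (acc, d)).1)[t]?).getD 0)) := by
  intro l
  induction l with
  | nil =>
    intro c hc hdrop acc d hacc hinv
    have hlen : ports.length ≤ c := by
      have := List.drop_eq_nil_iff.mp hdrop
      simp at this
      omega
    refine ⟨?_, ?_, ?_⟩
    · simp [PySem.List.enumerate_nil, hacc]; omega
    · intro t ht; simp [PySem.List.enumerate_nil]
    · intro t ht ht2; omega
  | cons x l' ih =>
    intro c hc hdrop acc d hacc hinv
    have hclt : c < ports.length := by
      by_contra hcon
      have : ports.reverse.drop c = [] := List.drop_eq_nil_iff.mpr (by simp; omega)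
      rw [this] at hdrop; exact (List.cons_ne_nil x l') hdrop.symm
    have hdrop' : ports.reverse.drop (c + 1) = l' := by
      have h1 : ports.reverse.drop (c + 1) = (ports.reverse.drop c).drop 1 := by
        rw [List.drop_drop]
      rw [h1, hdrop]; rfl
    have hget : ports[ports.length - 1 - c]? = some x := by
      have h0 : (ports.reverse.drop c)[0]? = some x := by rw [hdrop]; rfl
      rw [List.getElem?_drop, Nat.add_zero] at h0
      rwa [List.getElem?_reverse (by simpa using hclt)] at h0
    have hgi : pvG ports ((ports.length : Int) - 1 - (c : Int)) = x := by
      have hcast : ((ports.length : Int) - 1 - (c : Int)) = ((ports.length - 1 - c : Nat) : Int) := by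
        omega
      rw [hcast, pvG_natCast, hget]; rfl
    rw [PySem.List.enumerate_cons]
    simp only [List.foldl_cons]
    have hstep : pvNxtStep (ports.length : Int) (acc, d) ((c : Int), x)
        = (acc ++ [d.getD x (ports.length : Int)],
           d.insert x ((ports.length : Int) - 1 - (c : Int))) := rfl
    rw [hstep]
    have hinv' : pvDinvN ports ((c : Int) + 1)
        (d.insert x ((ports.length : Int) - 1 - (c : Int))) := by
      intro v
      constructor
      · intro k hk
        rw [PySem.Dict.get?_insert] at hk
        split_ifs at hk with hv
        · cases hk
          subst hv
          refine ⟨by omega, by omega, hgi, ?_⟩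
          intro t ht1 ht2; omega
        · have := (hinv v).1 k hk
          refine ⟨by omega, this.2.1, this.2.2.1, ?_⟩
          intro t ht1 ht2
          by_cases htm : t = (ports.length : Int) - 1 - (c : Int)
          · rw [htm, hgi]; exact fun h => hv h.symm
          · exact this.2.2.2 t (by omega) ht2
      · intro hk
        rw [PySem.Dict.get?_insert] at hk
        split_ifs at hk with hv
        intro t ht1 ht2
        by_cases htm : t = (ports.length : Int) - 1 - (c : Int)
        · rw [htm, hgi]; exact fun h => hv h.symm
        · exact (hinv v).2 hk t (by omega) ht2
    have hih := ih (c + 1) (by omega) hdrop' (acc ++ [d.getD x (ports.length : Int)])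
      (d.insert x ((ports.length : Int) - 1 - (c : Int))) (by simp [hacc])
      (by exact_mod_cast hinv')
    have hcast : ((c : Int) + 1) = ((c + 1 : Nat) : Int) := by push_cast; ring
    rw [hcast]
    refine ⟨hih.1, ?_, ?_⟩
    · intro t ht
      rw [hih.2.1 t (by omega)]
      rw [List.getElem?_append_left (by omega)]
    · intro t ht ht2
      by_cases htc : t = c
      · subst htc
        have hres : ((((PySem.List.enumerate l' ((t + 1 : Nat) : Int)).foldl
            (pvNxtStep (ports.length : Int))
            (acc ++ [d.getD x (ports.length : Int)],
             d.insert x ((ports.length : Int) - 1 - (t : Int)))).1)[t]?)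
            = some (d.getD x (ports.length : Int)) := by
          rw [hih.2.1 t (by omega)]
          rw [List.getElem?_append_right (by omega), hacc]
          simp
        rw [hres]
        simp only [Option.getD_some]
        rw [PySem.Dict.getD_eq_get?_getD]
        cases hdx : d.get? x with
        | none =>
          simp only [Option.getD_none]
          have hn := (hinv x).2 hdx
          refine ⟨by omega, by omega, ?_, by omega⟩
          intro s hs1 hs2
          rw [hgi]
          exact hn s (by omega) hs2
        | some k =>
          simp only [Option.getD_some]
          have hs := (hinv x).1 k hdx
          refine ⟨by omega, by omega, ?_, ?_⟩
          · intro s hs1 hs2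
            rw [hgi]
            exact hs.2.2.2 s (by omega) hs2
          · intro _
            rw [hgi]
            exact hs.2.2.1
      · exact hih.2.2 t (by omega) ht2

-- the two corollaries actually used by the equivalence proof
theorem pvPrev_spec (ports : List Int) (j : Int) (h0 : 0 ≤ j) (h1 : j < (ports.length : Int)) :
    pvPrevProp ports j (pvG (pvBPrev ports) j) := by
  have hinv0 : pvDinvP ports ((0 : Nat) : Int) PySem.Dict.empty := by
    intro v
    constructor
    · intro k hk; rw [PySem.Dict.get?_empty] at hk; cases hk
    · intro _ t ht1 ht2; omega
  have haux := pvPrevFoldAux ports ports 0 (by omega) rfl [] PySem.Dict.empty rfl hinv0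
  simp only [Nat.cast_zero] at haux
  have hj : j = ((j.toNat : Nat) : Int) := by omega
  rw [pvBPrev_eq, hj, pvG_natCast]
  exact haux.2.2 j.toNat (by omega) (by omega)
theorem pvNxt_spec (ports : List Int) (i : Int) (h0 : 0 ≤ i) (h1 : i < (ports.length : Int)) :
    pvNxtProp ports i (pvG (pvBNxt ports) i) := by
  have hinv0 : pvDinvN ports ((0 : Nat) : Int) PySem.Dict.empty := by
    intro v
    constructor
    · intro k hk; rw [PySem.Dict.get?_empty] at hk; cases hk
    · intro _ t ht1 ht2; omega
  have haux := pvNxtFoldAux ports ports.reverse 0 (by simp) rfl [] PySem.Dict.empty rfl hinv0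
  simp only [Nat.cast_zero] at haux
  have hlen : (((PySem.List.enumerate ports.reverse (0 : Int)).foldl
      (pvNxtStep (ports.length : Int)) ([], PySem.Dict.empty)).1).length = ports.length := haux.1
  have hi : i = ((i.toNat : Nat) : Int) := by omega
  have ht : ports.length - 1 - i.toNat < ports.length := by omega
  have hrev : ((pvBNxt ports)[i.toNat]?) =
      ((((PySem.List.enumerate ports.reverse (0 : Int)).foldl
        (pvNxtStep (ports.length : Int)) ([], PySem.Dict.empty)).1)[ports.length - 1 - i.toNat]?) := by
    rw [pvBNxt_eq]
    rw [List.getElem?_reverse (by rw [hlen]; omega)]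
    congr 1
    omega
  have hprop := haux.2.2 (ports.length - 1 - i.toNat) (by omega) (by omega)
  have hcast : (ports.length : Int) - 1 - ((ports.length - 1 - i.toNat : Nat) : Int) = i := by omega
  rw [hcast] at hprop
  rw [hi] at hprop
  rw [hi, pvG_natCast, hrev]
  exact hprop

theorem pvB_eq_canon (ports : List Int) (deps arrs : List Int) :
    spaceANoRepIndexes_alt ports deps arrs = pvCanon ports := by
  unfold spaceANoRepIndexes_alt pvCanon
  apply List.flatMap_congr
  intro i hi
  have hiB := PySem.List.mem_pyRange_one.mp hi
  have hq := pvNxt_spec ports i hiB.1 hiB.2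
  simp only [pvNxtProp, pvG] at hq
  -- the inner range [i+1, nxt[i]) is the filter of [i+1, n) by j < nxt[i]
  have hrange : PySem.List.pyRange (i + 1) (pvGetI (pvBNxt ports) i) 1
      = (PySem.List.pyRange (i + 1) (ports.length : Int) 1).filter
          (fun j => decide (j < pvGetI (pvBNxt ports) i)) := by
    rw [PySem.List.pyRange_one_append (i + 1) (pvGetI (pvBNxt ports) i) (ports.length : Int)
      (by have := hq.1; omega) hq.2.1]
    rw [List.filter_append]
    rw [List.filter_eq_self.mpr (by
      intro a ha
      have := PySem.List.mem_pyRange_one.mp ha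
      simp only [decide_eq_true_eq]
      omega)]
    rw [List.filter_eq_nil_iff.mpr (by
      intro a ha
      have := PySem.List.mem_pyRange_one.mp ha
      simp only [decide_eq_true_eq]
      omega)]
    simp
  rw [hrange, List.filter_filter]
  refine congrArg _ (List.filter_congr ?_)
  intro j hj
  have hjB := PySem.List.mem_pyRange_one.mp hj
  have hp := pvPrev_spec ports j (by omega) hjB.2
  simp only [pvPrevProp, pvG] at hp
  rw [Bool.eq_iff_iff]
  simp only [Bool.and_eq_true, decide_eq_true_eq, List.all_eq_true, PySem.List.mem_pyRange_one,
    bne_iff_ne, ne_eq]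
  constructor
  · rintro ⟨hple, hjq⟩
    constructor
    · intro k hk
      exact fun h => (hq.2.2.1 k (by omega) (by omega)) (by simpa [pvG, pvGetI] using h)
    · intro k hk
      exact fun h => (hp.2.2.1 k (by omega) (by omega)) (by simpa [pvG, pvGetI] using h)
  · rintro ⟨hA, hB⟩
    constructor
    · -- prev[j] ≤ i
      by_contra hgt
      push Not at hgt
      have h0p : 0 ≤ pvGetI (pvBPrev ports) j := by omega
      have := hp.2.2.2 h0p
      exact (hB _ ⟨by omega, hp.2.1⟩) (by simpa [pvG, pvGetI] using this)
    · -- j < nxt[i]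
      by_contra hge
      push Not at hge
      have hqn : pvGetI (pvBNxt ports) i < (ports.length : Int) := by omega
      have := hq.2.2.2 hqn
      exact (hA (pvGetI (pvBNxt ports) i) ⟨by omega, by omega⟩) (by simpa [pvG, pvGetI] using this)


-- ===== VERDICT (by name: the statement is the Claim_ definition above) =====
theorem spaceANoRepIndexes_spec : Claim_equal_spaceANoRepIndexes := by
  intro ports deps arrs _
  unfold Spec_spaceANoRepIndexes
  rw [pvA_eq_canon ports deps arrs, pvB_eq_canon ports deps arrs]
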